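-- pv_equiv track=rewrite | github.com/cltl/HumanLikeEL | utils.py | usingSplit2
-- ===== SOURCE A (Python) =====
-- def usingSplit2(line, _len=len):
--         words = line.split()
--         index = line.index
--         offsets = []
--         append = offsets.append
--         running_offset = 0
--         for word in words:
--                 word_offset = index(word, running_offset)
--                 word_len = _len(word)
--                 running_offset = word_offset + word_len
--                 append((word, word_offset, running_offset - 1))
--         return offsets
-- ===== SOURCE B (Python) =====
-- def usingSplit2(line, _len=len):
--     # One left-to-right pass: track the current word's characters and start index;
--     # flush a (word, start, end) triple when a whitespace run or the end of the line ends a word.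
--     offsets = []
--     cur = []
--     start = 0
--     for i, ch in enumerate(line):
--         if ch.isspace():
--             if cur:
--                 offsets.append((''.join(cur), start, i - 1))
--                 cur = []
--         else:
--             if not cur:
--                 start = i
--             cur.append(ch)
--     if cur:
--         offsets.append((''.join(cur), start, _len(line) - 1))
--     return offsets
-- ===== Notes on version B (the rewrite author's own statement) =====
-- stated objective: alternative
-- what changed: Replaces split()-then-index() re-scanning of the line with a single character-by-character pass that tracks the current word's start and characters directly.
import Mathlib
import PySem

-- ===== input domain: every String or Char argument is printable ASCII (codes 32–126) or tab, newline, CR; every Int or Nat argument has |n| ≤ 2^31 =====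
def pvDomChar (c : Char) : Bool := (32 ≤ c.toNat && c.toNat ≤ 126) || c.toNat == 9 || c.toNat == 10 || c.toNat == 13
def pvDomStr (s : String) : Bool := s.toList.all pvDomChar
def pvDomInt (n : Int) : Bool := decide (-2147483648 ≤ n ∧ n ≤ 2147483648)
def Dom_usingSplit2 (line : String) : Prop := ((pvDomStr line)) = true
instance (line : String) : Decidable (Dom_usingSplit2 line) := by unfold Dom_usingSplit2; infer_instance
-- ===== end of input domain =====

-- B replaces A's split()-then-index() re-scanning with a single left-to-right pass that
-- tracks the current word's characters and start index directly (objective: alternative).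

-- ===== PORT A =====
-- line.index(word, running_offset) never raises inside A (each word of line.split() occurs
-- at or after running_offset), so it is ported as PySem.Str.findFrom (exact where found).
def usingSplit2 (line : String) : List (String × Int × Int) :=
  let words := PySem.Str.split₀ line
  (words.foldl
    (fun (st : List (String × Int × Int) × Int) w =>
      let wordOffset := PySem.Str.findFrom line w st.2
      let runningOffset := wordOffset + (PySem.Str.len w : Int)
      (st.1 ++ [(w, wordOffset, runningOffset - 1)], runningOffset))
    ([], 0)).1

-- ===== PORT B =====
def usingSplit2_alt (line : String) : List (String × Int × Int) :=
  let st := (PySem.List.enumerate line.toList 0).foldl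
    (fun (st : List (String × Int × Int) × List Char × Int) p =>
      if PySem.Chars.isspace p.2 then
        if st.2.1 ≠ [] then (st.1 ++ [(String.ofList st.2.1, st.2.2, p.1 - 1)], [], st.2.2)
        else st
      else
        (st.1, st.2.1 ++ [p.2], if st.2.1 = [] then p.1 else st.2.2))
    ([], [], 0)
  if st.2.1 ≠ [] then st.1 ++ [(String.ofList st.2.1, st.2.2, (PySem.Str.len line : Int) - 1)]
  else st.1

-- ===== PRECONDITION & SPEC =====
def Spec_usingSplit2 (line : String) (out : List (String × Int × Int)) : Prop := out = usingSplit2_alt line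
instance (line : String) (out : List (String × Int × Int)) : Decidable (Spec_usingSplit2 line out) := by unfold Spec_usingSplit2; infer_instance

-- ===== CLAIM (what is proved, stated in full; the proofs are below) =====
def Claim_equal_usingSplit2 : Prop := ∀ (line : String), Dom_usingSplit2 line → Spec_usingSplit2 line (usingSplit2 line)

-- ===== LEMMAS AND PROOFS =====

-- Reference tokenizer: PySem.Chars.split₀.go with the word's start/end offsets added.
def goIx (s : List Char) (i : Int) (cur : List Char) (start : Int)
    (acc : List (List Char × Int × Int)) : List (List Char × Int × Int) :=
  match s with
  | [] => if cur.isEmpty then acc.reverse else ((cur.reverse, start, i - 1) :: acc).reverse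
  | c :: rest =>
      if PySem.Chars.isspace c then
        if cur.isEmpty then goIx rest (i+1) [] start acc
        else goIx rest (i+1) [] start ((cur.reverse, start, i - 1) :: acc)
      else goIx rest (i+1) (c :: cur) (if cur.isEmpty then i else start) acc

theorem goIx_fst (s : List Char) : ∀ (i start : Int) (cur : List Char) acc,
    (goIx s i cur start acc).map (·.1) = PySem.Chars.split₀.go s cur (acc.map (·.1)) := by
  induction s with
  | nil =>
    intro i start cur acc
    simp [goIx, PySem.Chars.split₀.go]
    split_ifs <;> simp [List.map_reverse]
  | cons c rest ih =>
    intro i start cur acc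
    rw [goIx, PySem.Chars.split₀.go]
    split_ifs <;> rw [ih] <;> simp

-- B's loop body / final flush, named for the proofs (definitionally B's port).
def bstep (st : List (String × Int × Int) × List Char × Int) (p : Int × Char) :
    List (String × Int × Int) × List Char × Int :=
  if PySem.Chars.isspace p.2 then
    if st.2.1 ≠ [] then (st.1 ++ [(String.ofList st.2.1, st.2.2, p.1 - 1)], [], st.2.2)
    else st
  else
    (st.1, st.2.1 ++ [p.2], if st.2.1 = [] then p.1 else st.2.2)

def bfinish (st : List (String × Int × Int) × List Char × Int) (e : Int) : List (String × Int × Int) :=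
  if st.2.1 ≠ [] then st.1 ++ [(String.ofList st.2.1, st.2.2, e)] else st.1

def entStr (e : List Char × Int × Int) : String × Int × Int := (String.ofList e.1, e.2.1, e.2.2)

theorem b_eq_goIx (s : List Char) : ∀ (i start : Int) (cur : List Char) (acc : List (List Char × Int × Int)),
    bfinish ((PySem.List.enumerate s i).foldl bstep (acc.reverse.map entStr, cur, start)) (i + s.length - 1)
    = (goIx s i cur.reverse start acc).map entStr := by
  induction s with
  | nil =>
    intro i start cur acc
    by_cases hc : cur = [] <;>
      simp [goIx, PySem.List.enumerate, bfinish, hc, List.map_reverse, entStr]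
  | cons c rest ih =>
    intro i start cur acc
    rw [PySem.List.enumerate_cons, List.foldl_cons]
    by_cases hsp : PySem.Chars.isspace c
    · by_cases hc : cur = []
      · subst hc
        rw [show bstep ((acc.reverse.map entStr), [], start) (i, c) = (acc.reverse.map entStr, ([] : List Char), start) by
          simp [bstep, hsp]]
        rw [show ((i : Int) + ((c :: rest).length : Int) - 1) = (i+1) + (rest.length : Int) - 1 by simp; ring]
        rw [ih (i+1) start [] acc]
        simp [goIx, hsp]
      · rw [show bstep ((acc.reverse.map entStr), cur, start) (i, c)
            = (acc.reverse.map entStr ++ [(String.ofList cur, start, i - 1)], ([] : List Char), start) by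
          simp [bstep, hsp, hc]]
        rw [show ((i : Int) + ((c :: rest).length : Int) - 1) = (i+1) + (rest.length : Int) - 1 by simp; ring]
        have h2 : acc.reverse.map entStr ++ [(String.ofList cur, start, i - 1)]
            = ((cur, start, i - 1) :: acc).reverse.map entStr := by
          simp [entStr]
        rw [h2, ih (i+1) start [] ((cur, start, i - 1) :: acc)]
        simp [goIx, hsp, hc]
    · rw [show bstep ((acc.reverse.map entStr), cur, start) (i, c)
          = (acc.reverse.map entStr, cur ++ [c], if cur = [] then i else start) by
        simp [bstep, hsp]]
      rw [show ((i : Int) + ((c :: rest).length : Int) - 1) = (i+1) + (rest.length : Int) - 1 by simp; ring]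
      rw [ih (i+1) (if cur = [] then i else start) (cur ++ [c]) acc]
      by_cases hc : cur = [] <;> simp [goIx, hsp, hc]

theorem head_of_prefix_drop {cs w : List Char} {k : Nat} (hw : w ≠ [])
    (hpre : w <+: cs.drop k) : k < cs.length ∧ cs[k]! = w.headI := by
  obtain ⟨t, ht⟩ := hpre
  obtain ⟨c, w', rfl⟩ := List.exists_cons_of_ne_nil hw
  have hk : k < cs.length := by
    by_contra h
    rw [List.drop_eq_nil_of_le (by omega)] at ht
    simp at ht
  have h0 : (cs.drop k)[0]? = some c := by rw [← ht]; rfl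
  rw [List.getElem?_drop] at h0
  refine ⟨hk, ?_⟩
  simp only [List.headI]
  have := List.getElem!_eq_getElem?_getD (l := cs) (i := k)
  rw [this, Nat.add_zero] at *
  simp [h0]

-- str.find(w, r) hits exactly the word start a when everything in [r, a) is whitespace.
theorem findFrom_eq_start (cs w : List Char) (r a : Nat) (hra : r ≤ a) (hw : w ≠ [])
    (hpre : w <+: cs.drop a)
    (hhead : PySem.Chars.isspace w.headI = false)
    (hws : ∀ j : Nat, r ≤ j → j < a → PySem.Chars.isspace cs[j]! = true) :
    PySem.Chars.findFrom cs w (r : Int) = (a : Int) := by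
  have ha : a < cs.length := (head_of_prefix_drop hw hpre).1
  rw [PySem.Chars.findFrom_natCast cs w r (by omega)]
  have hocc : w <+: (cs.drop r).drop (a - r) := by
    rw [List.drop_drop]
    rwa [show r + (a - r) = a by omega]
  have hinf : w <:+: cs.drop r := hocc.isInfix.trans (List.drop_suffix _ _).isInfix
  have hne : PySem.Chars.find (cs.drop r) w ≠ -1 := (PySem.Chars.find_ne_neg_one_iff _ _).2 hinf
  rw [if_neg hne]
  have h0 : 0 ≤ PySem.Chars.find (cs.drop r) w := (PySem.Chars.find_nonneg_iff _ _).2 hinf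
  obtain ⟨hfp, hmin⟩ := PySem.Chars.find_spec h0
  set t := (PySem.Chars.find (cs.drop r) w).toNat with ht
  have hle : t ≤ a - r := by
    by_contra h
    exact hmin (a - r) (by omega) hocc
  have hge : a - r ≤ t := by
    by_contra h
    have hp2 : w <+: cs.drop (r + t) := by
      rwa [List.drop_drop] at hfp
    obtain ⟨-, hh⟩ := head_of_prefix_drop hw hp2
    have hv := hws (r + t) (by omega) (by omega)
    rw [hh, hhead] at hv
    exact Bool.false_ne_true hv
  have : PySem.Chars.find (cs.drop r) w = ((a - r : Nat) : Int) := by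
    rw [← Int.toNat_of_nonneg h0, ← ht]
    congr 1
    omega
  rw [this]
  push_cast [Nat.cast_sub hra]
  ring

-- The offsets recorded by goIx, as A's fold needs them: each word sits at its recorded
-- start, preceded (from the running offset) only by whitespace.
def Chain (cs : List Char) : Int → List (List Char × Int × Int) → Prop
  | _, [] => True
  | r, e :: t =>
      0 ≤ r ∧ r ≤ e.2.1 ∧ e.1 ≠ [] ∧ (∀ c ∈ e.1, PySem.Chars.isspace c = false) ∧
      e.1 <+: cs.drop e.2.1.toNat ∧
      (∀ j : Nat, r.toNat ≤ j → j < e.2.1.toNat → PySem.Chars.isspace cs[j]! = true) ∧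
      e.2.2 = e.2.1 + e.1.length - 1 ∧ Chain cs (e.2.1 + e.1.length) t

-- A's loop body at the List Char level.
def astepC (cs : List Char) (st : List (List Char × Int × Int) × Int) (w : List Char) :
    List (List Char × Int × Int) × Int :=
  ((st.1 ++ [(w, PySem.Chars.findFrom cs w st.2, PySem.Chars.findFrom cs w st.2 + w.length - 1)]),
    PySem.Chars.findFrom cs w st.2 + w.length)

theorem afold_chain (cs : List Char) : ∀ (l : List (List Char × Int × Int)) (r : Int)
    (acc : List (List Char × Int × Int)), Chain cs r l →
    ((l.map (·.1)).foldl (astepC cs) (acc, r)).1 = acc ++ l := by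
  intro l
  induction l with
  | nil => intro r acc _; simp
  | cons e t ih =>
    intro r acc hch
    obtain ⟨hr0, hra, hw, hnsp, hpre, hws, hb, hcht⟩ := hch
    have ha0 : 0 ≤ e.2.1 := le_trans hr0 hra
    have hfind : PySem.Chars.findFrom cs e.1 r = e.2.1 := by
      have := findFrom_eq_start cs e.1 r.toNat e.2.1.toNat (by omega) hw hpre
        (by
          obtain ⟨c, w', hcw⟩ := List.exists_cons_of_ne_nil hw
          rw [hcw]; exact hnsp c (by rw [hcw]; exact List.mem_cons_self))
        hws
      rwa [Int.toNat_of_nonneg hr0, Int.toNat_of_nonneg ha0] at this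
    rw [List.map_cons, List.foldl_cons]
    show ((t.map (·.1)).foldl (astepC cs) (acc ++ [(e.1, PySem.Chars.findFrom cs e.1 r,
        PySem.Chars.findFrom cs e.1 r + e.1.length - 1)], PySem.Chars.findFrom cs e.1 r + e.1.length)).1 = _
    rw [hfind]
    have he : (e.1, e.2.1, e.2.1 + (e.1.length : Int) - 1) = e := by
      rw [← hb]
    rw [he, ih _ _ hcht]
    simp

theorem drop_head (cs s' : List Char) (c : Char) (i : Nat) (h : cs.drop i = c :: s') :
    i < cs.length ∧ cs[i]! = c ∧ cs.drop (i+1) = s' := by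
  have h0 : cs[i]? = some c := by
    have : (cs.drop i)[0]? = some c := by rw [h]; rfl
    rwa [List.getElem?_drop, Nat.add_zero] at this
  have hi : i < cs.length := by
    by_contra hb
    rw [List.getElem?_eq_none (by omega)] at h0
    simp at h0
  refine ⟨hi, ?_, ?_⟩
  · rw [List.getElem!_eq_getElem?_getD (l := cs), h0]; rfl
  · have : cs.drop (i+1) = (cs.drop i).drop 1 := by rw [List.drop_drop]
    rw [this, h]
    rfl

theorem goIx_spec (cs : List Char) : ∀ (s : List Char) (i start r : Nat)
    (acc : List (List Char × Int × Int)) (curR : List Char),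
    cs.drop i = s →
    (curR ≠ [] → start ≤ i ∧ curR.length = i - start ∧ curR.reverse <+: cs.drop start ∧
        (∀ c ∈ curR, PySem.Chars.isspace c = false) ∧ r ≤ start ∧
        (∀ j : Nat, r ≤ j → j < start → PySem.Chars.isspace cs[j]! = true)) →
    (curR = [] → r ≤ i ∧ (∀ j : Nat, r ≤ j → j < i → PySem.Chars.isspace cs[j]! = true)) →
    ∃ rest, goIx s (i : Int) curR (start : Int) acc = acc.reverse ++ rest ∧ Chain cs (r : Int) rest := by
  intro s
  induction s with
  | nil =>
    intro i start r acc curR hdrop hcur hcur0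
    by_cases hc : curR = []
    · exact ⟨[], by simp [goIx, hc], trivial⟩
    · obtain ⟨h1, h2, h3, h4, h5, h6⟩ := hcur hc
      refine ⟨[(curR.reverse, (start : Int), (i : Int) - 1)], by simp [goIx, hc], ?_⟩
      dsimp only [Chain]
      refine ⟨by positivity, by exact_mod_cast h5, by simpa using hc, ?_, ?_, ?_, ?_, trivial⟩
      · intro c hcmem; exact h4 c (List.mem_reverse.mp hcmem)
      · simpa using h3
      · intro j hj1 hj2
        exact h6 j (by simpa using hj1) (by simpa using hj2)
      · have : curR.reverse.length = i - start := by simpa using h2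
        rw [this]
        have := Nat.cast_sub (R := Int) h1
        omega
  | cons c s' ih =>
    intro i start r acc curR hdrop hcur hcur0
    obtain ⟨hi, hci, hdrop'⟩ := drop_head cs s' c i hdrop
    rw [goIx]
    by_cases hsp : PySem.Chars.isspace c
    · rw [if_pos hsp]
      by_cases hc : curR = []
      · subst hc
        rw [if_pos (by rfl)]
        have hc0 := hcur0 rfl
        obtain ⟨rest, hr1, hr2⟩ := ih (i+1) start r acc []
          (by exact_mod_cast hdrop')
          (fun h => absurd rfl h)
          (fun _ => ⟨by omega, by
            intro j hj1 hj2
            by_cases hji : j = i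
            · rw [hji, hci]; exact hsp
            · exact hc0.2 j hj1 (by omega)⟩)
        exact ⟨rest, by rw [← hr1]; congr 1 <;> push_cast <;> ring, hr2⟩
      · rw [if_neg (by simpa using hc)]
        obtain ⟨h1, h2, h3, h4, h5, h6⟩ := hcur hc
        obtain ⟨rest, hr1, hr2⟩ := ih (i+1) start i ((curR.reverse, (start : Int), (i : Int) - 1) :: acc) []
          (by exact_mod_cast hdrop')
          (fun h => absurd rfl h)
          (fun _ => ⟨by omega, by
            intro j hj1 hj2
            have : j = i := by omega
            rw [this, hci]; exact hsp⟩)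
        refine ⟨(curR.reverse, (start : Int), (i : Int) - 1) :: rest, ?_, ?_⟩
        · rw [show ((i : Int) + 1) = ((i + 1 : Nat) : Int) by push_cast; ring, hr1]
          simp
        · dsimp only [Chain]
          refine ⟨by positivity, by exact_mod_cast h5, by simpa using hc, ?_, ?_, ?_, ?_, ?_⟩
          · intro x hx; exact h4 x (List.mem_reverse.mp hx)
          · simpa using h3
          · intro j hj1 hj2
            exact h6 j (by simpa using hj1) (by simpa using hj2)
          · have : curR.reverse.length = i - start := by simpa using h2
            rw [this]
            have := Nat.cast_sub (R := Int) h1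
            omega
          · have heq : (start : Int) + curR.reverse.length = (i : Nat) := by
              have : curR.reverse.length = i - start := by simpa using h2
              rw [this]
              have := Nat.cast_sub (R := Int) h1
              omega
            rwa [heq]
    · rw [if_neg hsp]
      by_cases hc : curR = []
      · subst hc
        rw [if_pos (by rfl)]
        have hc0 := hcur0 rfl
        obtain ⟨rest, hr1, hr2⟩ := ih (i+1) i r acc [c]
          (by exact_mod_cast hdrop')
          (fun _ => ⟨by omega, by simp, ⟨s', by simpa using hdrop.symm⟩, by
              intro x hx
              rw [List.mem_singleton] at hx
              rw [hx]; simpa using hsp,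
            hc0.1, hc0.2⟩)
          (fun h => by simp at h)
        exact ⟨rest, by rw [← hr1]; congr 1 <;> push_cast <;> ring, hr2⟩
      · rw [if_neg (by simpa using hc)]
        obtain ⟨h1, h2, h3, h4, h5, h6⟩ := hcur hc
        have hsplit : cs.drop start = curR.reverse ++ (c :: s') := by
          obtain ⟨t, ht⟩ := h3
          have htt : t = cs.drop i := by
            have hdd := congrArg (List.drop curR.reverse.length) ht
            rw [List.drop_left] at hdd
            rw [List.drop_drop] at hdd
            have : start + curR.reverse.length = i := by simp at h2 ⊢; omega
            rwa [this] at hdd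
          rw [← ht, htt, hdrop]
        obtain ⟨rest, hr1, hr2⟩ := ih (i+1) start r acc (c :: curR)
          (by exact_mod_cast hdrop')
          (fun _ => ⟨by omega, by simp; omega, by
              rw [List.reverse_cons]
              exact ⟨s', by rw [hsplit]; simp⟩, by
              intro x hx
              rcases List.mem_cons.mp hx with h | h
              · rw [h]; simpa using hsp
              · exact h4 x h,
            h5, h6⟩)
          (fun h => by simp at h)
        exact ⟨rest, by rw [← hr1]; congr 1 <;> push_cast <;> ring, hr2⟩

theorem alt_eq (line : String) :
    usingSplit2_alt line
      = bfinish ((PySem.List.enumerate line.toList 0).foldl bstep ([], [], 0))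
          ((line.toList.length : Int) - 1) := by
  rfl

theorem strfold (line : String) (ws : List (List Char)) : ∀ (acc : List (List Char × Int × Int)) (r : Int),
    (ws.map String.ofList).foldl
      (fun (st : List (String × Int × Int) × Int) w =>
        let wordOffset := PySem.Str.findFrom line w st.2
        let runningOffset := wordOffset + (PySem.Str.len w : Int)
        (st.1 ++ [(w, wordOffset, runningOffset - 1)], runningOffset))
      (acc.map entStr, r)
    = (((ws.foldl (astepC line.toList) (acc, r)).1).map entStr,
        (ws.foldl (astepC line.toList) (acc, r)).2) := by
  induction ws with
  | nil => intro acc r; rfl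
  | cons w ws' ih =>
    intro acc r
    rw [List.map_cons, List.foldl_cons, List.foldl_cons]
    have hf : PySem.Str.findFrom line (String.ofList w) r = PySem.Chars.findFrom line.toList w r := by
      simp
    have hl : (PySem.Str.len (String.ofList w) : Int) = (w.length : Int) := by
      simp
    show (ws'.map String.ofList).foldl _
        (acc.map entStr ++ [(String.ofList w, PySem.Str.findFrom line (String.ofList w) r,
          PySem.Str.findFrom line (String.ofList w) r + (PySem.Str.len (String.ofList w) : Int) - 1)],
         PySem.Str.findFrom line (String.ofList w) r + (PySem.Str.len (String.ofList w) : Int)) = _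
    rw [hf, hl]
    have : acc.map entStr ++ [(String.ofList w, PySem.Chars.findFrom line.toList w r,
        PySem.Chars.findFrom line.toList w r + (w.length : Int) - 1)]
      = (acc ++ [(w, PySem.Chars.findFrom line.toList w r,
        PySem.Chars.findFrom line.toList w r + (w.length : Int) - 1)]).map entStr := by
      simp [entStr]
    rw [this, ih]
    rfl

theorem main_eq (line : String) : usingSplit2 line = usingSplit2_alt line := by
  obtain ⟨rest, hg, hch⟩ := goIx_spec line.toList line.toList 0 0 0 [] []
    (by simp) (fun h => absurd rfl h)
    (fun _ => ⟨Nat.le_refl 0, fun j h1 h2 => absurd h2 (by omega)⟩)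
  simp only [Nat.cast_zero, List.reverse_nil, List.nil_append] at hg hch
  have hA : usingSplit2 line = rest.map entStr := by
    show (((PySem.Chars.split₀ line.toList).map String.ofList).foldl _
      (([] : List (List Char × Int × Int)).map entStr, 0)).1 = _
    rw [strfold line (PySem.Chars.split₀ line.toList) [] 0]
    have hw : PySem.Chars.split₀ line.toList = rest.map (·.1) := by
      rw [← hg, goIx_fst]
      rfl
    rw [hw, afold_chain line.toList rest 0 [] hch]
    simp
  have hB : usingSplit2_alt line = (goIx line.toList 0 [] 0 []).map entStr := by
    rw [alt_eq]
    have hb := b_eq_goIx line.toList 0 0 [] []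
    simp only [List.reverse_nil, List.map_nil] at hb
    rw [show (0 : Int) + (line.toList.length : Int) - 1 = (line.toList.length : Int) - 1 by omega] at hb
    exact hb
  rw [hA, hB, hg]

-- ===== VERDICT (by name: the statement is the Claim_ definition above) =====
theorem usingSplit2_spec : Claim_equal_usingSplit2 := by
  intro line _
  unfold Spec_usingSplit2
  exact main_eq line
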